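-- pv_equiv track=rewrite | github.com/Lagrang3/mcf-algorithms | scatter-plot-cfcnfp.py | mkboxes
-- ===== SOURCE A (Python) =====
-- def mkboxes(X, Y):
--     pos = list(set([i for i in X]))
--     pos.sort()
--     idx = {}
--     for i, x in enumerate(pos):
--         idx[x] = i
--     boxes = [ [] for i in range(len(pos))]
--     for x,y in zip(X,Y):
--         boxes[idx[x]].append(y)
--     return boxes, pos
-- ===== SOURCE B (Python) =====
-- def mkboxes(X, Y):
--     # no index table and no routing pass: for each sorted unique position,
--     # collect its y values by scanning the zipped pairs directly
--     pos = sorted(set(X))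
--     boxes = [[y for x, y in zip(X, Y) if x == p] for p in pos]
--     return boxes, pos
-- ===== Notes on version B (the rewrite author's own statement) =====
-- stated objective: simpler
-- what changed: B drops A's enumerate-built position->index dict, the preallocated box list and the single routing pass, and instead collects each sorted unique position's y values with a direct comprehension scan of the zipped pairs (one scan per position).
import Mathlib
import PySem

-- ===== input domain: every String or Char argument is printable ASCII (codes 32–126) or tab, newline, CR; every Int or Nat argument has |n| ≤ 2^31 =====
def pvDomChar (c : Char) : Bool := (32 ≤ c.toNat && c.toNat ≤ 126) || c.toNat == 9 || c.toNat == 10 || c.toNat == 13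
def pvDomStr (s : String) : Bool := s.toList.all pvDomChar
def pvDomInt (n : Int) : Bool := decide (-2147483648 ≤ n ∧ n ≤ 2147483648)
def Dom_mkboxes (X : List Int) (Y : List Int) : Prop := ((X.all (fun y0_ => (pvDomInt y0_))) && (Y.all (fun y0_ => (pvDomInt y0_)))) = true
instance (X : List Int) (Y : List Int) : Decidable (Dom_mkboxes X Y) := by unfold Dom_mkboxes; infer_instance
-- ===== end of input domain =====

-- B drops A's index dict, preallocated boxes and routing pass, and collects each sorted unique
-- position's y values with a direct comprehension scan of the zipped pairs (objective: simpler).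

-- ===== PORT A =====
def mkboxes (X : List Int) (Y : List Int) : List (List Int) × List Int :=
  -- pos = list(set(X)); pos.sort()
  let pos : List Int := PySem.List.sorted (PySem.Set.ofList X) (fun x => x)
  -- idx = {}; for i, x in enumerate(pos): idx[x] = i
  let idx : PySem.Dict Int Int :=
    (PySem.List.enumerate pos).foldl (fun d p => d.insert p.2 p.1) PySem.Dict.empty
  -- boxes = [ [] for i in range(len(pos))]
  let boxes0 : List (List Int) := (PySem.List.pyRange 0 pos.length 1).map (fun _ => ([] : List Int))
  -- for x,y in zip(X,Y): boxes[idx[x]].append(y)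
  -- idx[x] : KeyError impossible (every x of X is a key); getD's default 0 is never used
  let boxes : List (List Int) :=
    (X.zip Y).foldl (fun bs p =>
      let j := idx.getD p.1 0
      PySem.List.pySetD bs j ((PySem.List.pyGetD bs j []) ++ [p.2])) boxes0
  (boxes, pos)

-- ===== PORT B =====
def mkboxes_alt (X : List Int) (Y : List Int) : List (List Int) × List Int :=
  -- pos = sorted(set(X))
  let pos : List Int := PySem.List.sorted (PySem.Set.ofList X) (fun x => x)
  -- boxes = [[y for x, y in zip(X, Y) if x == p] for p in pos]
  let boxes : List (List Int) :=
    pos.map (fun p => ((X.zip Y).filter (fun q => q.1 == p)).map (·.2))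
  (boxes, pos)

-- ===== PRECONDITION & SPEC =====
def Spec_mkboxes (X : List Int) (Y : List Int) (out : List (List Int) × List Int) : Prop := out = mkboxes_alt X Y
instance (X : List Int) (Y : List Int) (out : List (List Int) × List Int) : Decidable (Spec_mkboxes X Y out) := by unfold Spec_mkboxes; infer_instance

-- ===== CLAIM (what is proved, stated in full; the proofs are below) =====
def Claim_equal_mkboxes : Prop := ∀ (X : List Int) (Y : List Int), Dom_mkboxes X Y → Spec_mkboxes X Y (mkboxes X Y)

-- ===== LEMMAS AND PROOFS =====

-- keys later in the fold that differ from x do not change getD x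
theorem pvIdx_getD_not_mem (l : List (Int × Int)) (d : PySem.Dict Int Int) (x : Int)
    (hx : x ∉ l.map (·.2)) :
    (l.foldl (fun d p => d.insert p.2 p.1) d).getD x 0 = d.getD x 0 := by
  induction l generalizing d with
  | nil => rfl
  | cons p t ih =>
    simp only [List.map_cons, List.mem_cons, not_or] at hx
    simp only [List.foldl_cons]
    rw [ih _ hx.2, PySem.Dict.getD_insert]
    simp [hx.1]

-- the idx dict maps pos[k] to (s + k)
theorem pvIdx_getD (pos : List Int) (hnd : pos.Nodup) (s : Int) (d : PySem.Dict Int Int)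
    (k : Nat) (hk : k < pos.length) :
    ((PySem.List.enumerate pos s).foldl (fun d p => d.insert p.2 p.1) d).getD pos[k] 0 = s + k := by
  induction pos generalizing s d k with
  | nil => simp at hk
  | cons a t ih =>
    rw [PySem.List.enumerate_cons]
    simp only [List.foldl_cons]
    cases k with
    | zero =>
      have hnotmem : (a : Int) ∉ (PySem.List.enumerate t (s+1)).map (·.2) := by
        rw [PySem.List.map_snd_enumerate]
        exact (List.nodup_cons.mp hnd).1
      simp only [List.getElem_cons_zero]
      rw [pvIdx_getD_not_mem _ _ _ hnotmem, PySem.Dict.getD_insert]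
      simp
    | succ k' =>
      simp only [List.getElem_cons_succ]
      rw [ih (List.nodup_cons.mp hnd).2 (s+1) _ k' (by simpa using hk)]
      push_cast
      ring

-- setting a nodup-indexed constant-shape list at the index of x = pointwise update at x
theorem pvMap_set (pos : List Int) (hnd : pos.Nodup) (f : Int → List Int) (x : Int) (v : List Int)
    (k : Nat) (hk : k < pos.length) (hx : pos[k] = x) :
    (pos.map f).set k v = pos.map (fun q => if q = x then v else f q) := by
  apply List.ext_getElem (by simp)
  intro i h1 h2
  simp only [List.getElem_set, List.getElem_map]
  have hlen : i < pos.length := by simpa using h2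
  by_cases hik : i = k
  · subst hik; simp [hx]
  · have : pos[i] ≠ x := by
      intro hEq
      exact hik (hnd.getElem_inj_iff.mp (hEq.trans hx.symm))
    simp only [this, if_false]
    rw [if_neg (fun h => hik h.symm)]

-- invariant of A's routing loop: the boxes stay "pos mapped through an accumulator function"
theorem pvFoldA (pos : List Int) (hnd : pos.Nodup)
    (idx : PySem.Dict Int Int)
    (hidx : ∀ (k : Nat) (hk : k < pos.length), idx.getD pos[k] 0 = (k : Int))
    (L : List (Int × Int)) (hL : ∀ p ∈ L, p.1 ∈ pos) (f : Int → List Int) :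
    L.foldl (fun bs p =>
        let j := idx.getD p.1 0
        PySem.List.pySetD bs j ((PySem.List.pyGetD bs j []) ++ [p.2])) (pos.map f)
      = pos.map (fun q => f q ++ (L.filter (fun p => p.1 == q)).map (·.2)) := by
  induction L generalizing f with
  | nil => simp
  | cons p t ih =>
    obtain ⟨x, y⟩ := p
    have hxmem : x ∈ pos := hL (x, y) (List.mem_cons_self)
    obtain ⟨k, hk, hxk⟩ := List.getElem_of_mem hxmem
    simp only [List.foldl_cons]
    have hj : idx.getD x 0 = (k : Int) := by rw [← hxk]; exact hidx k hk
    have hget : PySem.List.pyGetD (pos.map f) ((k : Nat) : Int) [] = f x := by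
      rw [PySem.List.pyGetD_eq_getElem _ _ (by positivity) (by simpa using hk)]
      simp [hxk]
    have hstep :
        PySem.List.pySetD (pos.map f) (idx.getD x 0)
            ((PySem.List.pyGetD (pos.map f) (idx.getD x 0) []) ++ [y])
          = pos.map (fun q => if q = x then f x ++ [y] else f q) := by
      rw [hj, hget, PySem.List.pySetD_natCast]
      exact pvMap_set pos hnd f x (f x ++ [y]) k hk hxk
    rw [hstep, ih (fun p hp => hL p (List.mem_cons_of_mem _ hp))]
    apply List.map_congr_left
    intro q hq
    by_cases hqx : q = x
    · subst hqx
      simp [List.append_assoc]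
    · have : (x == q) = false := by simp [Ne.symm hqx]
      simp [this, hqx]

theorem pvNodup_pos (X : List Int) :
    (PySem.List.sorted (PySem.Set.ofList X) (fun x => x)).Nodup :=
  (PySem.List.sorted_ofList_pairwise_lt (xs := X)).nodup

-- ===== VERDICT (by name: the statement is the Claim_ definition above) =====
theorem mkboxes_spec : Claim_equal_mkboxes := by
  unfold Claim_equal_mkboxes Spec_mkboxes
  intro X Y _
  unfold mkboxes mkboxes_alt
  simp only []
  set pos := PySem.List.sorted (PySem.Set.ofList X) (fun x => x) with hpos
  have hnd : pos.Nodup := pvNodup_pos X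
  congr 1
  have hboxes0 : (PySem.List.pyRange 0 pos.length 1).map (fun _ => ([] : List Int))
      = pos.map (fun _ => ([] : List Int)) := by
    apply List.ext_getElem <;> simp [PySem.List.length_pyRange_one]
  rw [hboxes0]
  rw [pvFoldA pos hnd _
      (fun k hk => by
        rw [pvIdx_getD pos hnd 0 PySem.Dict.empty k hk]; ring)
      (X.zip Y)
      (fun p hp => by
        have : p.1 ∈ X := (List.of_mem_zip hp).1
        rw [hpos, PySem.List.mem_sorted]
        simpa [PySem.Set.mem_ofList] using this)
      (fun _ => [])]
  simp
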